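-- pv_equiv track=rewrite | github.com/vmred/codewars | katas/kyu6/Your orders please/solution.py | order
-- ===== SOURCE A (Python) =====
-- def order(sentence):
--     numbers = ['1', '2', '3', '4', '5', '6', '7', '8', '9']
--     l = sentence.split()
--     res = []
--     for i in numbers:
--         for k, m in enumerate(l):
--             if i in m:
--                 res.append(l[k])
--     return ' '.join(res)
-- ===== SOURCE B (Python) =====
-- DIGITS = ('1', '2', '3', '4', '5', '6', '7', '8', '9')
--
--
-- def order(sentence):
--     # One word-major pass: bucket each word under every digit it contains,
--     # then flatten the buckets in digit order.
--     index = {}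
--     for word in sentence.split():
--         for d in DIGITS:
--             if d in word:
--                 index[d] = index.get(d, []) + [word]
--     out = []
--     for d in DIGITS:
--         out.extend(index.get(d, []))
--     return ' '.join(out)
-- ===== Notes on version B (the rewrite author's own statement) =====
-- stated objective: alternative
-- what changed: A rescans the whole word list once per digit (digit-major nested loops); B makes a single word-major pass that buckets each word into a digit-indexed dict and then flattens the buckets in digit order.
import Mathlib
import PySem

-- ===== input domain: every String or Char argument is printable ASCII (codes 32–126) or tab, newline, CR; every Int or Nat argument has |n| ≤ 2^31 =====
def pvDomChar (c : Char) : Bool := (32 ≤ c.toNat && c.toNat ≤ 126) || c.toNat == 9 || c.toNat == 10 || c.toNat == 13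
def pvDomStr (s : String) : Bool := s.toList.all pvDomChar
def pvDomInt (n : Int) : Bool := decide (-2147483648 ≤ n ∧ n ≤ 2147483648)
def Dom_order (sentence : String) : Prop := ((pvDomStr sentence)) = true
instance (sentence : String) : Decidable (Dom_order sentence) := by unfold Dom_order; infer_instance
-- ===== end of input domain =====

-- B replaces A's nine digit-major rescans of the word list with one word-major
-- pass building a digit-indexed dict of buckets, flattened in digit order (alternative, same cost).

-- ===== PORT A =====
def order (sentence : String) : String :=
  let numbers : List String := ["1", "2", "3", "4", "5", "6", "7", "8", "9"]
  let l := PySem.Str.split₀ sentence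
  let res :=
    numbers.foldl (fun res i =>
      (PySem.List.enumerate l).foldl (fun res km =>
        if PySem.Str.isIn i km.2 then
          -- l[k]: k is an enumerate index, always in range, so getD's default is unreachable
          res ++ [(PySem.List.pyGet? l km.1).getD ""]
        else res) res) []
  PySem.Str.join " " res

-- ===== PORT B =====
def pvDigits : List String := ["1", "2", "3", "4", "5", "6", "7", "8", "9"]

def order_alt (sentence : String) : String :=
  let index : PySem.Dict String (List String) :=
    (PySem.Str.split₀ sentence).foldl (fun index word =>
      pvDigits.foldl (fun index d =>
        if PySem.Str.isIn d word then index.modify d [] (· ++ [word]) else index) index)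
      PySem.Dict.empty
  let out := pvDigits.foldl (fun out d => out ++ index.getD d []) []
  PySem.Str.join " " out

-- ===== PRECONDITION & SPEC =====
def Spec_order (sentence : String) (out : String) : Prop := out = order_alt sentence
instance (sentence : String) (out : String) : Decidable (Spec_order sentence out) := by unfold Spec_order; infer_instance

-- ===== CLAIM (what is proved, stated in full; the proofs are below) =====
def Claim_equal_order : Prop := ∀ (sentence : String), Dom_order sentence → Spec_order sentence (order sentence)

-- ===== LEMMAS AND PROOFS =====

-- A's inner loop: over index/word pairs that really index into l, it appends the filtered words.
lemma orderA_inner (l : List String) (i : String) :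
    ∀ (ps : List (Int × String)) (res : List String),
      (∀ p ∈ ps, PySem.List.pyGet? l p.1 = some p.2) →
      ps.foldl (fun res km =>
        if PySem.Str.isIn i km.2 then res ++ [(PySem.List.pyGet? l km.1).getD ""] else res) res
        = res ++ (ps.filter (fun p => PySem.Str.isIn i p.2)).map (·.2) := by
  intro ps
  induction ps with
  | nil => intro res _; simp
  | cons p ps ih =>
    intro res h
    have hp := h p (List.mem_cons_self ..)
    have ht : ∀ q ∈ ps, PySem.List.pyGet? l q.1 = some q.2 :=
      fun q hq => h q (List.mem_cons_of_mem _ hq)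
    rw [List.foldl_cons, List.filter_cons]
    by_cases hc : PySem.Str.isIn i p.2 = true
    · rw [if_pos hc, if_pos hc, ih _ ht, hp]
      simp only [Option.getD_some, List.map_cons, List.append_assoc, List.singleton_append]
    · rw [if_neg hc, if_neg hc, ih _ ht]

-- B's inner loop (fixed word): effect on bucket c, for a Nodup digit list.
lemma orderB_inner (word : String) :
    ∀ (ds : List String), ds.Nodup → ∀ (idx : PySem.Dict String (List String)) (c : String),
      (ds.foldl (fun idx d =>
        if PySem.Str.isIn d word then idx.modify d [] (· ++ [word]) else idx) idx).getD c []
        = idx.getD c [] ++ (if c ∈ ds ∧ PySem.Str.isIn c word = true then [word] else []) := by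
  intro ds
  induction ds with
  | nil => intro _ idx c; simp
  | cons d ds ih =>
    intro hnd idx c
    have hnd' : ds.Nodup := hnd.of_cons
    have hdd : d ∉ ds := (List.nodup_cons.mp hnd).1
    rw [List.foldl_cons]
    by_cases hdw : PySem.Str.isIn d word = true
    · rw [if_pos hdw, ih hnd']
      by_cases hcd : c = d
      · subst hcd
        rw [PySem.Dict.getD_modify_self,
          if_neg (fun h : c ∈ ds ∧ _ => hdd h.1),
          if_pos ⟨List.mem_cons_self .., hdw⟩]
        simp
      · rw [PySem.Dict.getD_modify_of_ne idx [] _ hcd]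
        congr 1
        by_cases hcds : c ∈ ds ∧ PySem.Str.isIn c word = true
        · rw [if_pos hcds, if_pos ⟨List.mem_cons_of_mem _ hcds.1, hcds.2⟩]
        · rw [if_neg hcds,
            if_neg (fun h => hcds ⟨(List.mem_cons.mp h.1).resolve_left hcd, h.2⟩)]
    · rw [if_neg hdw, ih hnd']
      congr 1
      by_cases hcds : c ∈ ds ∧ PySem.Str.isIn c word = true
      · rw [if_pos hcds, if_pos ⟨List.mem_cons_of_mem _ hcds.1, hcds.2⟩]
      · rw [if_neg hcds, if_neg (fun h : c ∈ d :: ds ∧ PySem.Str.isIn c word = true =>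
          hcds ⟨(List.mem_cons.mp h.1).resolve_left
            (fun hcd => hdw (by rw [← hcd]; exact h.2)), h.2⟩)]

-- B's outer loop: bucket c collects exactly the words containing c (for a digit c).
lemma orderB_outer (c : String) (hc : c ∈ pvDigits) :
    ∀ (ws : List String) (idx : PySem.Dict String (List String)),
      (ws.foldl (fun index word =>
        pvDigits.foldl (fun index d =>
          if PySem.Str.isIn d word then index.modify d [] (· ++ [word]) else index) index) idx).getD c []
        = idx.getD c [] ++ ws.filter (fun w => PySem.Str.isIn c w) := by
  intro ws
  induction ws with
  | nil => intro idx; simp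
  | cons w ws ih =>
    have hnd : pvDigits.Nodup := by decide
    intro idx
    rw [List.foldl_cons, ih, orderB_inner w pvDigits hnd idx c, List.filter_cons]
    by_cases hcw : PySem.Str.isIn c w = true
    · rw [if_pos ⟨hc, hcw⟩, if_pos hcw]
      simp
    · rw [if_neg (fun h => hcw h.2), if_neg hcw]
      simp

lemma enumerate_get (l : List String) :
    ∀ p ∈ PySem.List.enumerate l 0, PySem.List.pyGet? l p.1 = some p.2 := by
  intro p hp
  rcases (PySem.List.mem_enumerate_iff l 0 p).mp hp with ⟨k, hk, rfl⟩
  simp [PySem.List.pyGet?_natCast, List.getElem?_eq_getElem hk]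

-- ===== VERDICT (by name: the statement is the Claim_ definition above) =====
theorem order_spec : Claim_equal_order := by
  intro sentence _
  unfold Spec_order order order_alt
  simp only
  set l := PySem.Str.split₀ sentence with hl
  congr 1
  have hA : ∀ (ns : List String) (res : List String),
      ns.foldl (fun res i =>
        (PySem.List.enumerate l).foldl (fun res km =>
          if PySem.Str.isIn i km.2 then res ++ [(PySem.List.pyGet? l km.1).getD ""] else res) res) res
      = res ++ ns.flatMap (fun i => l.filter (fun w => PySem.Str.isIn i w)) := by
    intro ns
    induction ns with
    | nil => intro res; simp
    | cons i ns ih =>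
      intro res
      rw [List.foldl_cons, ih, orderA_inner l i _ res (enumerate_get l)]
      have hmap : ((PySem.List.enumerate l 0).filter
          (fun p => PySem.Str.isIn i p.2)).map (fun x : Int × String => x.2)
          = l.filter (fun w => PySem.Str.isIn i w) := by
        rw [show (fun p : Int × String => PySem.Str.isIn i p.2)
            = ((fun w => PySem.Str.isIn i w) ∘ (fun p : Int × String => p.2)) from rfl,
          ← List.filter_map, PySem.List.map_snd_enumerate]
      rw [hmap, List.flatMap_cons, List.append_assoc]
  have hB : ∀ (ds : List String) (out : List String),
      (∀ d ∈ ds, d ∈ pvDigits) →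
      ds.foldl (fun out d => out ++
        ((l.foldl (fun index word =>
          pvDigits.foldl (fun index d =>
            if PySem.Str.isIn d word then index.modify d [] (· ++ [word]) else index) index)
          PySem.Dict.empty).getD d [])) out
      = out ++ ds.flatMap (fun d => l.filter (fun w => PySem.Str.isIn d w)) := by
    intro ds
    induction ds with
    | nil => intro out _; simp
    | cons d ds ih =>
      intro out h
      rw [List.foldl_cons, ih _ (fun x hx => h x (List.mem_cons_of_mem _ hx)),
        orderB_outer d (h d (List.mem_cons_self ..)) l PySem.Dict.empty,
        List.flatMap_cons, List.append_assoc]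
      simp
  rw [hA ["1","2","3","4","5","6","7","8","9"] [], hB pvDigits [] (fun d hd => hd)]
  rfl
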